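-- pv_equiv track=rewrite | github.com/raikoug/AoCv2 | python/aoc_solutions/2023/day_14.py | _tilt_line_right
-- ===== SOURCE A (Python) =====
-- from typing import Dict, List, Tuple
--
-- def _tilt_line_right(line: str) -> str:
--     """
--     "Inclina" una riga verso destra: le pietre 'O' rotolano fino a incontrare
--     un muro '#' o il bordo, preservando l'ordine relativo interno al segmento.
--     """
--     segments = line.split("#")
--     new_segments: List[str] = []
--
--     for segment in segments:
--         if not segment:
--             new_segments.append(segment)
--             continue
--         rocks = segment.count("O")
--         rock_str = "O" * rocks
--         # Metti le 'O' a destra, riempiendo a sinistra con '.'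
--         new_segments.append(rock_str.rjust(len(segment), "."))
--
--     return "#".join(new_segments)
-- ===== SOURCE B (Python) =====
-- def _tilt_line_right(line: str) -> str:
--     # Single left-to-right pass: count rocks and non-rocks since the last wall,
--     # flush each finished segment as dots-then-rocks.
--     parts = []
--     rocks = 0
--     others = 0
--     for ch in line:
--         if ch == '#':
--             parts.append('.' * others + 'O' * rocks + '#')
--             rocks = 0
--             others = 0
--         elif ch == 'O':
--             rocks += 1
--         else:
--             others += 1
--     parts.append('.' * others + 'O' * rocks)
--     return ''.join(parts)
-- ===== Notes on version B (the rewrite author's own statement) =====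
-- stated objective: alternative
-- what changed: Replaced the split-on-walls + per-segment count/rjust + join pipeline by a single left-to-right pass that keeps counters of rocks and non-rocks since the last wall and flushes each segment (dots, then rocks, then the wall) as it is completed.
import Mathlib
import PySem

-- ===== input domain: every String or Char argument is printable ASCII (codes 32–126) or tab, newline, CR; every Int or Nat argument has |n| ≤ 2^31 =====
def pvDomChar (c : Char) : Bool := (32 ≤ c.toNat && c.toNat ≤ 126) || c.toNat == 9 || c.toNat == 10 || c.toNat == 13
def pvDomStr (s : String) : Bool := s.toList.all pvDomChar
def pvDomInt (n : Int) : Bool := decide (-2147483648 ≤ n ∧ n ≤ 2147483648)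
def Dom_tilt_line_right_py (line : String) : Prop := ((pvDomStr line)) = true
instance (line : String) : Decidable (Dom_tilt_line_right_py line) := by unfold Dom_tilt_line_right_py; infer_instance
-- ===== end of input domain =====

-- B replaces A's split/count/rjust/join pipeline by a single left-to-right pass that
-- counts rocks and non-rocks since the last wall and flushes each segment at a wall (objective: alternative).

-- ===== PORT A =====
def tilt_line_right_py (line : String) : String :=
  let segments := PySem.Chars.splitOn line.toList ['#']
  let new_segments : List (List Char) :=
    segments.foldl (fun acc segment =>
      if segment = [] then acc ++ [segment]
      else
        let rocks := PySem.Chars.count segment ['O']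
        let rock_str := List.replicate rocks 'O'
        -- rjust(len(segment), '.'): left-pad with '.' to the segment's length
        -- (exact here: rock_str.length = rocks ≤ segment.length, so Python pads by the difference)
        acc ++ [List.replicate (segment.length - rock_str.length) '.' ++ rock_str]) []
  String.ofList (PySem.Chars.join ['#'] new_segments)

-- ===== PORT B =====
-- B-side helpers: the loop body of Source B (state = flushed output, rocks, others)
-- and the final flush + ''.join.
def pvStep (st : List Char × Nat × Nat) (ch : Char) : List Char × Nat × Nat :=
  if ch = '#' then
    (st.1 ++ (List.replicate st.2.2 '.' ++ List.replicate st.2.1 'O' ++ ['#']), 0, 0)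
  else if ch = 'O' then (st.1, st.2.1 + 1, st.2.2)
  else (st.1, st.2.1, st.2.2 + 1)

def pvOut (st : List Char × Nat × Nat) : List Char :=
  st.1 ++ (List.replicate st.2.2 '.' ++ List.replicate st.2.1 'O')

def tilt_line_right_py_alt (line : String) : String :=
  String.ofList (pvOut (line.toList.foldl pvStep ([], 0, 0)))

-- ===== PRECONDITION & SPEC =====
def Spec_tilt_line_right_py (line : String) (out : String) : Prop := out = tilt_line_right_py_alt line
instance (line : String) (out : String) : Decidable (Spec_tilt_line_right_py line out) := by unfold Spec_tilt_line_right_py; infer_instance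

-- ===== CLAIM (what is proved, stated in full; the proofs are below) =====
def Claim_equal_tilt_line_right_py : Prop := ∀ (line : String), Dom_tilt_line_right_py line → Spec_tilt_line_right_py line (tilt_line_right_py line)

-- ===== LEMMAS AND PROOFS =====
def pvSegs : List Char → List Char → List (List Char)
  | [], cur => [cur.reverse]
  | c :: t, cur => if c = '#' then cur.reverse :: pvSegs t [] else pvSegs t (c :: cur)

lemma pvSegs_ne_nil (cs : List Char) : ∀ cur, pvSegs cs cur ≠ [] := by
  induction cs with
  | nil => intro cur; simp [pvSegs]
  | cons c t ih =>
    intro cur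
    simp only [pvSegs]
    split
    · simp
    · exact ih _

lemma pv_splitOn_go (cs : List Char) : ∀ (fuel : Nat) (cur : List Char) (acc : List (List Char)),
    cs.length < fuel →
    PySem.Chars.splitOn.go ['#'] fuel cs cur acc = acc.reverse ++ pvSegs cs cur := by
  induction cs with
  | nil =>
    intro fuel cur acc h
    match fuel, h with
    | fuel + 1, _ => simp [PySem.Chars.splitOn.go, pvSegs]
  | cons c t ih =>
    intro fuel cur acc h
    match fuel, h with
    | fuel + 1, h =>
      simp only [PySem.Chars.splitOn.go, List.isPrefixOf_cons₂, List.isPrefixOf_nil_left,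
        Bool.and_true]
      by_cases hc : c = '#'
      · simp only [hc, beq_self_eq_true, if_true]
        have hd : List.drop ['#'].length ('#' :: t) = t := rfl
        rw [hd, ih fuel [] (cur.reverse :: acc) (by simp only [List.length_cons] at h; omega)]
        simp [pvSegs]
      · have hb : ('#' == c) = false := beq_eq_false_iff_ne.mpr (fun e => hc e.symm)
        simp only [hb, Bool.false_eq_true, if_false]
        rw [ih fuel (c :: cur) acc (by simp only [List.length_cons] at h; omega)]
        simp [pvSegs, hc]

lemma pv_splitOn (cs : List Char) : PySem.Chars.splitOn cs ['#'] = pvSegs cs [] := by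
  rw [PySem.Chars.splitOn, pv_splitOn_go cs (cs.length + 1) [] [] (by omega)]
  simp

lemma pv_count_go (cs : List Char) : ∀ (fuel acc : Nat), cs.length ≤ fuel →
    PySem.Chars.count.go ['O'] fuel cs acc = acc + cs.count 'O' := by
  induction cs with
  | nil => intro fuel acc _; cases fuel <;> simp [PySem.Chars.count.go]
  | cons c t ih =>
    intro fuel acc h
    match fuel, h with
    | fuel + 1, h =>
      simp only [PySem.Chars.count.go, List.isPrefixOf_cons₂, List.isPrefixOf_nil_left,
        Bool.and_true]
      by_cases hc : c = 'O'
      · have hb : ('O' == c) = true := by simp [hc]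
        simp only [hb, if_true]
        have hd : List.drop ['O'].length (c :: t) = t := rfl
        rw [hd, ih fuel (acc + 1) (by simp only [List.length_cons] at h; omega)]
        have : (c :: t).count 'O' = t.count 'O' + 1 := by simp [hc]
        omega
      · have hb : ('O' == c) = false := beq_eq_false_iff_ne.mpr (fun e => hc e.symm)
        simp only [hb, Bool.false_eq_true, if_false]
        rw [ih fuel acc (by simp only [List.length_cons] at h; omega)]
        have : (c :: t).count 'O' = t.count 'O' := by simp [hc]
        omega

lemma pv_count (cs : List Char) : PySem.Chars.count cs ['O'] = cs.count 'O' := by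
  rw [PySem.Chars.count]
  simpa using pv_count_go cs cs.length 0 le_rfl


def pvSeg (s : List Char) : List Char :=
  List.replicate (s.length - s.count 'O') '.' ++ List.replicate (s.count 'O') 'O'

lemma pv_fold_A (segs : List (List Char)) : ∀ (acc : List (List Char)),
    segs.foldl (fun acc segment =>
      if segment = [] then acc ++ [segment]
      else
        let rocks := PySem.Chars.count segment ['O']
        let rock_str := List.replicate rocks 'O'
        acc ++ [List.replicate (segment.length - rock_str.length) '.' ++ rock_str]) acc
    = acc ++ segs.map pvSeg := by
  induction segs with
  | nil => intro acc; simp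
  | cons s t ih =>
    intro acc
    simp only [List.foldl_cons, List.map_cons]
    by_cases hs : s = []
    · subst hs
      simp only [ih]
      simp [pvSeg]
    · simp only [hs, if_false]
      rw [ih]
      simp [pvSeg, pv_count]

lemma pv_intercalate_cons (a : List Char) (l : List (List Char)) (hl : l ≠ []) :
    List.intercalate ['#'] (a :: l) = a ++ '#' :: List.intercalate ['#'] l := by
  cases l with
  | nil => exact absurd rfl hl
  | cons b t => simp [List.intercalate, List.intersperse]

def pvF : List Char → Nat → Nat → List Char
  | [], r, o => List.replicate o '.' ++ List.replicate r 'O'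
  | c :: t, r, o =>
    if c = '#' then List.replicate o '.' ++ List.replicate r 'O' ++ '#' :: pvF t 0 0
    else if c = 'O' then pvF t (r + 1) o else pvF t r (o + 1)

lemma pv_A_eq_F (cs : List Char) : ∀ (cur : List Char),
    PySem.Chars.join ['#'] ((pvSegs cs cur).map pvSeg)
      = pvF cs (cur.count 'O') (cur.length - cur.count 'O') := by
  induction cs with
  | nil =>
    intro cur
    simp [pvSegs, pvF, PySem.Chars.join, List.intercalate, pvSeg]
  | cons c t ih =>
    intro cur
    by_cases hc : c = '#'
    · subst hc
      simp only [pvSegs, pvF, if_true, List.map_cons, PySem.Chars.join]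
      rw [pv_intercalate_cons _ _ (by simp [List.map_eq_nil_iff, pvSegs_ne_nil t []])]
      have h0 := ih []
      simp only [PySem.Chars.join, List.count_nil, List.length_nil, Nat.sub_zero] at h0
      rw [h0]
      simp [pvSeg]
    · have hcnt : cur.count 'O' ≤ cur.length := List.count_le_length
      by_cases ho : c = 'O'
      · subst ho
        simp only [pvSegs, pvF, if_neg hc, if_true]
        rw [ih ('O' :: cur)]
        have e1 : ('O' :: cur).count 'O' = cur.count 'O' + 1 := by simp
        have e2 : ('O' :: cur).length - (cur.count 'O' + 1) = cur.length - cur.count 'O' := by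
          simp only [List.length_cons]; omega
        rw [e1, e2]
      · simp only [pvSegs, pvF, if_neg hc, if_neg ho]
        rw [ih (c :: cur)]
        have e1 : (c :: cur).count 'O' = cur.count 'O' := by simp [ho]
        have e2 : (c :: cur).length - cur.count 'O' = (cur.length - cur.count 'O') + 1 := by
          simp only [List.length_cons]; omega
        rw [e1, e2]

lemma pv_B_eq_F (cs : List Char) : ∀ (out : List Char) (r o : Nat),
    pvOut (cs.foldl pvStep (out, r, o)) = out ++ pvF cs r o := by
  induction cs with
  | nil => intro out r o; simp [pvOut, pvF]
  | cons c t ih =>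
    intro out r o
    by_cases hc : c = '#'
    · subst hc
      rw [List.foldl_cons, show pvStep (out, r, o) '#' =
        (out ++ (List.replicate o '.' ++ List.replicate r 'O' ++ ['#']), 0, 0) from if_pos rfl,
        ih, pvF]
      simp
    · by_cases ho : c = 'O'
      · subst ho
        rw [List.foldl_cons, show pvStep (out, r, o) 'O' = (out, r + 1, o) by
          simp [pvStep, hc], ih]
        simp [pvF, hc]
      · rw [List.foldl_cons, show pvStep (out, r, o) c = (out, r, o + 1) by
          simp [pvStep, hc, ho], ih]
        simp [pvF, hc, ho]

-- ===== VERDICT (by name: the statement is the Claim_ definition above) =====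
theorem tilt_line_right_py_spec : Claim_equal_tilt_line_right_py := by
  intro line _
  show tilt_line_right_py line = tilt_line_right_py_alt line
  simp only [tilt_line_right_py, tilt_line_right_py_alt]
  rw [pv_splitOn, pv_fold_A, List.nil_append, pv_A_eq_F line.toList [], pv_B_eq_F line.toList [] 0 0]
  simp
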